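-- pv_equiv track=rewrite | github.com/felixrauh/conference_scheduler | src/matching_pipeline.py | compute_hopping_benefit
-- ===== SOURCE A (Python) =====
-- from typing import Dict, List, Set, Tuple, Optional, FrozenSet
--
-- def compute_achievable_attendance(
--     ordered_blocks: List[Tuple[str, ...]],
--     participant_prefs: Set[str]
-- ) -> int:
--     """
--     Compute maximum talks a participant can attend via room-hopping.
--
--     At each timeslot, the participant can choose any one talk from any block.
--     They maximize total attended talks.
--
--     Args:
--         ordered_blocks: List of blocks, each with talks in order
--         participant_prefs: Set of preferred talk_ids
--
--     Returns:
--         Maximum number of talks the participant can attend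
--     """
--     if not ordered_blocks:
--         return 0
--
--     k = len(ordered_blocks[0])  # talks per block
--     attended = 0
--
--     for slot in range(k):
--         # At this timeslot, check each block for a preferred talk
--         for block in ordered_blocks:
--             if slot < len(block) and block[slot] in participant_prefs:
--                 attended += 1
--                 break  # Can only attend one talk per slot
--
--     return attended
--
-- def compute_hopping_benefit(
--     ordered_blocks: List[Tuple[str, ...]],
--     preferences: Dict[str, Set[str]]
-- ) -> int:
--     """
--     Compute total room-hopping benefit across all participants.
--
--     Benefit = (talks attended with hopping) - (talks attended without hopping)
--
--     Without hopping: participant attends all talks in their best block.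
--     With hopping: participant can switch rooms each timeslot.
--     """
--     benefit = 0
--
--     for p_id, prefs in preferences.items():
--         # With hopping
--         with_hopping = compute_achievable_attendance(ordered_blocks, prefs)
--
--         # Without hopping: best block
--         best_block_count = 0
--         for block in ordered_blocks:
--             count = sum(1 for talk in block if talk in prefs)
--             best_block_count = max(best_block_count, count)
--
--         benefit += with_hopping - best_block_count
--
--     return benefit
-- ===== SOURCE B (Python) =====
-- def compute_hopping_benefit(ordered_blocks, preferences):
--     # One pass per participant over the blocks (block-major), building the set of
--     # covered timeslots and the best-block count simultaneously, instead of A's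
--     # per-slot scan over all blocks plus a separate best-block pass.
--     if not ordered_blocks:
--         return 0
--     k = len(ordered_blocks[0])
--     total = 0
--     for prefs in preferences.values():
--         covered = set()
--         best = 0
--         for block in ordered_blocks:
--             count = 0
--             for slot, talk in enumerate(block):
--                 if talk in prefs:
--                     count += 1
--                     if slot < k:
--                         covered.add(slot)
--             if count > best:
--                 best = count
--         total += len(covered) - best
--     return total
-- ===== Notes on version B (the rewrite author's own statement) =====
-- stated objective: alternative
-- what changed: Replaces A's per-slot scan over all blocks (with break) plus a separate best-block counting pass by a single block-major pass per participant that builds the set of covered timeslots and the running best-block count simultaneously.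
import Mathlib
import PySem

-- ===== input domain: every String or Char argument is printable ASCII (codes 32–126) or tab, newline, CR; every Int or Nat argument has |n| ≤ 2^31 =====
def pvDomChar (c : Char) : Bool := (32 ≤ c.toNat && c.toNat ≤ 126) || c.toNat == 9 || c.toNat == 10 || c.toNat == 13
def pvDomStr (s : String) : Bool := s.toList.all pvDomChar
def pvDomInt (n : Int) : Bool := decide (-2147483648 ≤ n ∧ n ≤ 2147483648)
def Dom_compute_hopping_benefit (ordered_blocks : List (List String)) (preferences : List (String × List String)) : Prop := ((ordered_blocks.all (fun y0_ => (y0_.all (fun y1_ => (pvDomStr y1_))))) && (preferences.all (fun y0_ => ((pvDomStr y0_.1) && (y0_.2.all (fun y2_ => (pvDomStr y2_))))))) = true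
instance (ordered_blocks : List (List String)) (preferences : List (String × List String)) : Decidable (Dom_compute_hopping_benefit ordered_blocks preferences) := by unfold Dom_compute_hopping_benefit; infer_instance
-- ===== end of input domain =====

-- B fuses A's per-slot block scan and separate best-block pass into one block-major pass
-- per participant, collecting the covered timeslots as a set (alternative decomposition).


-- ===== PORT A =====
-- compute_achievable_attendance: range(k) and block[slot] use nonnegative in-range
-- indices only, so List.range / List.getD are exact here; the inner for-with-break
-- (attend one talk per slot) is List.any.
def pvAchievableA (ordered_blocks : List (List String)) (prefs : List String) : Int :=
  if ordered_blocks = [] then 0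
  else
    (List.range (ordered_blocks.headD []).length).foldl
      (fun attended slot =>
        if ordered_blocks.any
            (fun block => decide (slot < block.length) && prefs.contains (block.getD slot "")) then
          attended + 1
        else attended) 0

-- the "best block" loop of compute_hopping_benefit
def pvBestBlockA (ordered_blocks : List (List String)) (prefs : List String) : Int :=
  ordered_blocks.foldl
    (fun best block =>
      max best (block.foldl (fun c talk => if prefs.contains talk then c + 1 else c) 0)) 0

def compute_hopping_benefit (ordered_blocks : List (List String)) (preferences : List (String × List String)) : Int :=
  preferences.foldl
    (fun benefit p => benefit + (pvAchievableA ordered_blocks p.2 - pvBestBlockA ordered_blocks p.2)) 0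

-- ===== PORT B =====
-- one block-major pass for one participant: (covered slots set, best block count)
def pvParticipantB (ordered_blocks : List (List String)) (k : Int) (prefs : List String) : Int :=
  let st := ordered_blocks.foldl
    (fun (st : PySem.Set Int × Int) block =>
      let cs := (PySem.List.enumerate block 0).foldl
        (fun (cs : PySem.Set Int × Int) p =>
          if prefs.contains p.2 then
            (if p.1 < k then PySem.Set.add cs.1 p.1 else cs.1, cs.2 + 1)
          else cs) (st.1, 0)
      (cs.1, if cs.2 > st.2 then cs.2 else st.2))
    (PySem.Set.empty, 0)
  PySem.Set.len st.1 - st.2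

def compute_hopping_benefit_alt (ordered_blocks : List (List String)) (preferences : List (String × List String)) : Int :=
  if ordered_blocks = [] then 0
  else
    let k : Int := (ordered_blocks.headD []).length
    preferences.foldl (fun total p => total + pvParticipantB ordered_blocks k p.2) 0

-- ===== PRECONDITION & SPEC =====
def Spec_compute_hopping_benefit (ordered_blocks : List (List String)) (preferences : List (String × List String)) (out : Int) : Prop := out = compute_hopping_benefit_alt ordered_blocks preferences
instance (ordered_blocks : List (List String)) (preferences : List (String × List String)) (out : Int) : Decidable (Spec_compute_hopping_benefit ordered_blocks preferences out) := by unfold Spec_compute_hopping_benefit; infer_instance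

-- ===== CLAIM (what is proved, stated in full; the proofs are below) =====
def Claim_equal_compute_hopping_benefit : Prop := ∀ (ordered_blocks : List (List String)) (preferences : List (String × List String)), Dom_compute_hopping_benefit ordered_blocks preferences → Spec_compute_hopping_benefit ordered_blocks preferences (compute_hopping_benefit ordered_blocks preferences)

-- ===== LEMMAS AND PROOFS =====

-- proof-side abbreviations
def pvCovStep (prefs : List String) (k : Int) (s : PySem.Set Int) (p : Int × String) : PySem.Set Int :=
  if prefs.contains p.2 then (if p.1 < k then PySem.Set.add s p.1 else s) else s

def pvCnt (prefs : List String) (block : List String) : Int :=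
  (block.countP (fun talk => prefs.contains talk) : Int)

def pvCovAll (prefs : List String) (k : Int) (ordered_blocks : List (List String)) : PySem.Set Int :=
  ordered_blocks.foldl
    (fun s block => (PySem.List.enumerate block 0).foldl (pvCovStep prefs k) s) PySem.Set.empty

-- the per-block inner fold splits into the covered-set fold and the plain count
theorem pv_inner_split (prefs : List String) (k : Int) :
    ∀ (block : List String) (j : Int) (s : PySem.Set Int) (c : Int),
      (PySem.List.enumerate block j).foldl
        (fun (cs : PySem.Set Int × Int) p =>
          if prefs.contains p.2 then
            (if p.1 < k then PySem.Set.add cs.1 p.1 else cs.1, cs.2 + 1)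
          else cs) (s, c)
      = ((PySem.List.enumerate block j).foldl (pvCovStep prefs k) s, c + pvCnt prefs block) := by
  intro block
  induction block with
  | nil => intro j s c; simp [PySem.List.enumerate_nil, pvCnt]
  | cons t bl ih =>
    intro j s c
    rw [PySem.List.enumerate_cons]
    by_cases h : prefs.contains t
    · have ht : t ∈ prefs := by simpa using h
      simp only [List.foldl_cons, pvCovStep, h, if_true, ih]
      simp [pvCnt, ht]
      ring
    · have ht : t ∉ prefs := by simpa using h
      simp only [List.foldl_cons, pvCovStep, h, ih]
      simp [pvCnt, ht]

-- the outer fold splits into the covered-set fold and the best-count fold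
theorem pv_if_max (a c : Int) : (if c > a then c else a) = max a c := by
  rw [max_def]; split_ifs <;> omega

theorem pv_outer_split (prefs : List String) (k : Int) (ordered_blocks : List (List String))
    (s : PySem.Set Int) (b : Int) :
      ordered_blocks.foldl
        (fun (st : PySem.Set Int × Int) block =>
          let cs := (PySem.List.enumerate block 0).foldl
            (fun (cs : PySem.Set Int × Int) p =>
              if prefs.contains p.2 then
                (if p.1 < k then PySem.Set.add cs.1 p.1 else cs.1, cs.2 + 1)
              else cs) (st.1, 0)
          (cs.1, if cs.2 > st.2 then cs.2 else st.2)) (s, b)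
      = (ordered_blocks.foldl
           (fun s block => (PySem.List.enumerate block 0).foldl (pvCovStep prefs k) s) s,
         ordered_blocks.foldl (fun b block => max b (pvCnt prefs block)) b) := by
  have h1 := PySem.List.foldl_congr_mem ordered_blocks
    (fun (st : PySem.Set Int × Int) block =>
      let cs := (PySem.List.enumerate block 0).foldl
        (fun (cs : PySem.Set Int × Int) p =>
          if prefs.contains p.2 then
            (if p.1 < k then PySem.Set.add cs.1 p.1 else cs.1, cs.2 + 1)
          else cs) (st.1, 0)
      (cs.1, if cs.2 > st.2 then cs.2 else st.2))
    (fun (st : PySem.Set Int × Int) block =>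
      ((PySem.List.enumerate block 0).foldl (pvCovStep prefs k) st.1,
        max st.2 (pvCnt prefs block)))
    (s, b)
    (by intro st block _
        simp only [pv_inner_split, zero_add]
        rw [pv_if_max])
  rw [h1]
  exact PySem.List.foldl_prod_mk
    (fun s block => (PySem.List.enumerate block 0).foldl (pvCovStep prefs k) s)
    (fun b block => max b (pvCnt prefs block)) ordered_blocks s b

-- membership in the covered set accumulated over one block
theorem pv_mem_inner (prefs : List String) (k : Int) :
    ∀ (block : List String) (j : Int) (s : PySem.Set Int) (x : Int),
      (x ∈ (PySem.List.enumerate block j).foldl (pvCovStep prefs k) s) ↔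
        (x ∈ s ∨ ∃ i : Nat, i < block.length ∧ prefs.contains (block.getD i "") = true ∧
           j + (i : Int) < k ∧ x = j + (i : Int)) := by
  intro block
  induction block with
  | nil => intro j s x; simp [PySem.List.enumerate_nil]
  | cons t bl ih =>
    intro j s x
    rw [PySem.List.enumerate_cons]
    simp only [List.foldl_cons, ih]
    constructor
    · rintro (hm | ⟨i, hi, hc, hk, hx⟩)
      · unfold pvCovStep at hm
        split_ifs at hm with h1 h2
        · rcases (PySem.Set.mem_add s j x).mp hm with hm | rfl
          · exact Or.inl hm
          · exact Or.inr ⟨0, by simp, by simpa using h1, by simpa using h2, by simp⟩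
        · exact Or.inl hm
        · exact Or.inl hm
      · exact Or.inr ⟨i + 1, by simpa using hi, by simpa using hc, by push_cast; omega,
          by push_cast; omega⟩
    · rintro (hm | ⟨i, hi, hc, hk, hx⟩)
      · left
        unfold pvCovStep
        split_ifs with h1 h2
        · exact (PySem.Set.mem_add s j x).mpr (Or.inl hm)
        · exact hm
        · exact hm
      · match i with
        | 0 =>
          left
          unfold pvCovStep
          have hc0 : prefs.contains t = true := by simpa using hc
          have hk0 : j < k := by push_cast at hk; omega
          have hx0 : x = j := by simpa using hx
          rw [if_pos hc0, if_pos hk0]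
          exact (PySem.Set.mem_add s j x).mpr (Or.inr hx0)
        | Nat.succ i' =>
          right
          refine ⟨i', by simpa using hi, by simpa using hc, by push_cast at hk ⊢; omega,
            by push_cast at hx ⊢; omega⟩

-- the covered set stays duplicate-free
theorem pv_nodup_inner (prefs : List String) (k : Int) :
    ∀ (block : List String) (j : Int) (s : PySem.Set Int), s.Nodup →
      ((PySem.List.enumerate block j).foldl (pvCovStep prefs k) s).Nodup := by
  intro block
  induction block with
  | nil => intro j s hs; simpa [PySem.List.enumerate_nil] using hs
  | cons t bl ih =>
    intro j s hs
    rw [PySem.List.enumerate_cons]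
    simp only [List.foldl_cons]
    apply ih
    unfold pvCovStep
    split_ifs
    · exact PySem.Set.nodup_add s j hs
    · exact hs
    · exact hs

theorem pv_mem_covAll (prefs : List String) (k : Int) (ordered_blocks : List (List String)) (x : Int) :
    x ∈ pvCovAll prefs k ordered_blocks ↔
      ∃ block ∈ ordered_blocks, ∃ i : Nat, i < block.length ∧
        prefs.contains (block.getD i "") = true ∧ (i : Int) < k ∧ x = (i : Int) := by
  unfold pvCovAll
  have gen : ∀ (obs : List (List String)) (s : PySem.Set Int),
      x ∈ obs.foldl (fun s block => (PySem.List.enumerate block 0).foldl (pvCovStep prefs k) s) s ↔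
        x ∈ s ∨ ∃ block ∈ obs, ∃ i : Nat, i < block.length ∧
          prefs.contains (block.getD i "") = true ∧ (i : Int) < k ∧ x = (i : Int) := by
    intro obs
    induction obs with
    | nil => intro s; simp
    | cons block obs ih =>
      intro s
      simp only [List.foldl_cons, ih, pv_mem_inner, List.mem_cons]
      constructor
      · rintro ((hm | ⟨i, hi, hc, hk, hx⟩) | ⟨bl, hbl, rest⟩)
        · exact Or.inl hm
        · exact Or.inr ⟨block, Or.inl rfl, i, hi, hc, by omega, by omega⟩
        · exact Or.inr ⟨bl, Or.inr hbl, rest⟩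
      · rintro (hm | ⟨bl, hbl | hbl, rest⟩)
        · exact Or.inl (Or.inl hm)
        · subst hbl
          rcases rest with ⟨i, hi, hc, hk, hx⟩
          exact Or.inl (Or.inr ⟨i, hi, hc, by omega, by omega⟩)
        · exact Or.inr ⟨bl, hbl, rest⟩
  simpa using gen ordered_blocks PySem.Set.empty

theorem pv_nodup_covAll (prefs : List String) (k : Int) (ordered_blocks : List (List String)) :
    (pvCovAll prefs k ordered_blocks).Nodup := by
  unfold pvCovAll
  have gen : ∀ (obs : List (List String)) (s : PySem.Set Int), s.Nodup →
      (obs.foldl (fun s block => (PySem.List.enumerate block 0).foldl (pvCovStep prefs k) s) s).Nodup := by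
    intro obs
    induction obs with
    | nil => intro s hs; simpa using hs
    | cons block obs ih =>
      intro s hs
      simp only [List.foldl_cons]
      exact ih _ (pv_nodup_inner prefs k block 0 s hs)
  exact gen ordered_blocks PySem.Set.empty (by simp [PySem.Set.empty])

-- A's per-slot hit predicate
def pvHit (ordered_blocks : List (List String)) (prefs : List String) (slot : Nat) : Bool :=
  ordered_blocks.any (fun block => decide (slot < block.length) && prefs.contains (block.getD slot ""))

-- |covered| equals A's count of hit slots
theorem pv_len_covAll (prefs : List String) (ordered_blocks : List (List String)) (kN : Nat) :
    PySem.Set.len (pvCovAll prefs (kN : Int) ordered_blocks)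
      = ((List.range kN).countP (pvHit ordered_blocks prefs) : Int) := by
  have hnd2 : (((List.range kN).filter (pvHit ordered_blocks prefs)).map
      (fun n : Nat => (n : Int))).Nodup := by
    refine List.Nodup.map (fun a b h => by exact_mod_cast h) ?_
    exact List.Nodup.filter _ List.nodup_range
  have hperm : (pvCovAll prefs (kN : Int) ordered_blocks).Perm
      (((List.range kN).filter (pvHit ordered_blocks prefs)).map (fun n : Nat => (n : Int))) := by
    rw [List.perm_ext_iff_of_nodup (pv_nodup_covAll _ _ _) hnd2]
    intro x
    rw [pv_mem_covAll]
    simp only [List.mem_map, List.mem_filter, List.mem_range]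
    constructor
    · rintro ⟨block, hbl, i, hi, hc, hk, rfl⟩
      refine ⟨i, ⟨by exact_mod_cast hk, ?_⟩, rfl⟩
      unfold pvHit
      rw [List.any_eq_true]
      exact ⟨block, hbl, by rw [Bool.and_eq_true]; exact ⟨decide_eq_true hi, hc⟩⟩
    · rintro ⟨n, ⟨hn, hhit⟩, rfl⟩
      unfold pvHit at hhit
      rw [List.any_eq_true] at hhit
      rcases hhit with ⟨block, hbl, hcond⟩
      simp only [Bool.and_eq_true, decide_eq_true_eq] at hcond
      exact ⟨block, hbl, n, hcond.1, hcond.2, by exact_mod_cast hn, rfl⟩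
  have hlen := hperm.length_eq
  simp only [List.length_map] at hlen
  rw [List.countP_eq_length_filter]
  simp only [PySem.Set.len]
  omega

-- the per-participant values agree (nonempty schedule)
theorem pv_participant_eq (ordered_blocks : List (List String)) (hne : ordered_blocks ≠ [])
    (prefs : List String) :
    pvParticipantB ordered_blocks ((ordered_blocks.headD []).length : Int) prefs
      = pvAchievableA ordered_blocks prefs - pvBestBlockA ordered_blocks prefs := by
  unfold pvParticipantB
  rw [pv_outer_split]
  have hach : pvAchievableA ordered_blocks prefs
      = ((List.range (ordered_blocks.headD []).length).countP (pvHit ordered_blocks prefs) : Int) := by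
    unfold pvAchievableA
    rw [if_neg hne]
    have := PySem.List.foldl_count_if (pvHit ordered_blocks prefs)
      (List.range (ordered_blocks.headD []).length) 0
    unfold pvHit at this
    rw [zero_add] at this
    exact this
  have hbest : pvBestBlockA ordered_blocks prefs
      = ordered_blocks.foldl (fun b block => max b (pvCnt prefs block)) 0 := by
    unfold pvBestBlockA
    apply PySem.List.foldl_congr_mem
    intro acc block _
    congr 1
    have := PySem.List.foldl_count_if (fun talk => prefs.contains talk) block 0
    rw [zero_add] at this
    rw [this, pvCnt]
  rw [hach, hbest]
  have hcov : ordered_blocks.foldl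
      (fun s block => (PySem.List.enumerate block 0).foldl (pvCovStep prefs ((ordered_blocks.headD []).length : Int)) s)
      PySem.Set.empty = pvCovAll prefs ((ordered_blocks.headD []).length : Int) ordered_blocks := rfl
  simp only [hcov]
  rw [pv_len_covAll]

-- ===== VERDICT (by name: the statement is the Claim_ definition above) =====
theorem compute_hopping_benefit_spec : Claim_equal_compute_hopping_benefit := by
  intro ordered_blocks preferences _
  unfold Spec_compute_hopping_benefit compute_hopping_benefit compute_hopping_benefit_alt
  by_cases hne : ordered_blocks = []
  · subst hne
    have hz : ∀ p : String × List String,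
        pvAchievableA [] p.2 - pvBestBlockA [] p.2 = 0 := by
      intro p; simp [pvAchievableA, pvBestBlockA]
    rw [if_pos rfl]
    rw [PySem.List.foldl_congr_mem preferences _ (fun (benefit : Int) _ => benefit) 0
      (by intro acc p _; rw [hz p]; ring)]
    exact PySem.List.foldl_ignore preferences 0
  · rw [if_neg hne]
    apply PySem.List.foldl_congr_mem
    intro acc p _
    rw [pv_participant_eq ordered_blocks hne p.2]
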